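-- pv_equiv track=rewrite | github.com/LarekMehdi/python | numbers/grains.py | get_wheat_map
-- ===== SOURCE A (Python) =====
-- def get_wheat_map(number):
--     dic = dict()
--     for i in range(1, number+1):
--         if i > 1:
--             last_num = dic[i-1]
--             dic[i] = last_num * 2
--         else:
--             dic[i] = i
--
--     return dic
-- ===== SOURCE B (Python) =====
-- def get_wheat_map(number):
--     return {i: 1 << (i - 1) for i in range(1, number + 1)}
-- ===== Notes on version B (the rewrite author's own statement) =====
-- stated objective: simpler
-- what changed: B computes each square's grain count directly by the closed form 1 << (i-1) in a dict comprehension, instead of A's loop that reads the previous dict entry and doubles it.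
import Mathlib
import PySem

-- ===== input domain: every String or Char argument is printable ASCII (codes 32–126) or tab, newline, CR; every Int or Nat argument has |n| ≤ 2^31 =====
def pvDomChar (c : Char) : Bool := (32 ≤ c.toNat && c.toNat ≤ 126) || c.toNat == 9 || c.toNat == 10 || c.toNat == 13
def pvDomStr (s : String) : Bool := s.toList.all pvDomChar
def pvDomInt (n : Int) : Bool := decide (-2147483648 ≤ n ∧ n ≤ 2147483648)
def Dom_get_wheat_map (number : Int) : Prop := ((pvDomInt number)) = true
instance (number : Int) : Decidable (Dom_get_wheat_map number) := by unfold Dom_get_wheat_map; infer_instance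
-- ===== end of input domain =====

-- B replaces A's running-double that reads the previous dict entry by the closed form 2^(i-1) per key (objective: simpler).

-- ===== PORT A =====
-- dic[i-1] always hits an existing key (i-1 was inserted on the previous iteration), so getD with dummy default 0 is exact.
def get_wheat_map (number : Int) : List (Int × Int) :=
  ((PySem.List.pyRange 1 (number + 1) 1).foldl
    (fun d i =>
      if i > 1 then
        d.insert i (d.getD (i - 1) 0 * 2)
      else
        d.insert i i)
    (PySem.Dict.empty : PySem.Dict Int Int)).items

-- ===== PORT B =====
-- dict comprehension over distinct keys: its item list is exactly this map; 1 << (i-1) is (1 : Int) <<< (i-1).toNat.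
def get_wheat_map_alt (number : Int) : List (Int × Int) :=
  (PySem.List.pyRange 1 (number + 1) 1).map (fun i => (i, (1 : Int) <<< (i - 1).toNat))

-- ===== PRECONDITION & SPEC =====
def Spec_get_wheat_map (number : Int) (out : List (Int × Int)) : Prop := out = get_wheat_map_alt number
instance (number : Int) (out : List (Int × Int)) : Decidable (Spec_get_wheat_map number out) := by unfold Spec_get_wheat_map; infer_instance

-- ===== CLAIM (what is proved, stated in full; the proofs are below) =====
def Claim_equal_get_wheat_map : Prop := ∀ (number : Int), Dom_get_wheat_map number → Spec_get_wheat_map number (get_wheat_map number)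

-- ===== LEMMAS AND PROOFS =====

-- invariant: after processing 1..n, A's dict is exactly the closed-form association list
lemma get_wheat_map_loop (n : Nat) :
    (PySem.List.pyRange 1 ((n : Int) + 1) 1).foldl
      (fun d i =>
        if i > 1 then
          d.insert i (d.getD (i - 1) 0 * 2)
        else
          d.insert i i)
      (PySem.Dict.empty : PySem.Dict Int Int)
    = PySem.Dict.mk ((PySem.List.pyRange 1 ((n : Int) + 1) 1).map (fun i => (i, 2 ^ (i - 1).toNat))) := by
  induction n with
  | zero =>
      simp [PySem.List.pyRange_one_eq_nil, PySem.Dict.empty]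
  | succ m ih =>
      have h1 : (1 : Int) ≤ (m : Int) + 1 := by omega
      have hsplit := PySem.List.pyRange_one_succ_right h1
      push_cast
      rw [hsplit, List.foldl_append, List.map_append, ih]
      simp only [List.foldl_cons, List.foldl_nil, List.map_cons, List.map_nil]
      by_cases hm : m = 0
      · subst hm
        simp [PySem.List.pyRange_one_eq_nil, PySem.Dict.insert]
      · have hm1 : (1 : Nat) ≤ m := Nat.one_le_iff_ne_zero.mpr hm
        have hgt : ((m : Int) + 1) > 1 := by
          have : (1 : Int) ≤ (m : Int) := by exact_mod_cast hm1
          omega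
        rw [if_pos hgt]
        have hnodup : (PySem.Dict.mk ((PySem.List.pyRange 1 ((m : Int) + 1) 1).map
            (fun i => (i, (2 : Int) ^ (i - 1).toNat)))).keys.Nodup := by
          simp only [PySem.Dict.keys, List.map_map, Function.comp_def]
          simpa using PySem.List.nodup_pyRange_one 1 ((m : Int) + 1)
        have hmem : ((m : Int), (2 : Int) ^ (((m : Int)) - 1).toNat) ∈
            (PySem.Dict.mk ((PySem.List.pyRange 1 ((m : Int) + 1) 1).map
              (fun i => (i, (2 : Int) ^ (i - 1).toNat)))).items := by
          simp only [List.mem_map]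
          exact ⟨(m : Int), by
            rw [PySem.List.mem_pyRange_one]
            constructor
            · exact_mod_cast hm1
            · omega, rfl⟩
        have hgetD := PySem.Dict.getD_of_mem_items _ hmem hnodup 0
        rw [show ((m : Int) + 1 - 1) = (m : Int) by ring]
        rw [hgetD]
        have hval : (2 : Int) ^ ((m : Int) - 1).toNat * 2 = 2 ^ ((m : Int) + 1 - 1).toNat := by
          have h2 : ((m : Int) - 1).toNat = m - 1 := by omega
          have h3 : ((m : Int) + 1 - 1).toNat = m := by omega
          rw [h2, h3, ← pow_succ]
          congr 1
          omega

        -- (m:Int)+1 is a fresh key: it is not in pyRange 1 (m+1)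
        have hfresh : (PySem.Dict.mk ((PySem.List.pyRange 1 ((m : Int) + 1) 1).map
            (fun i => (i, (2 : Int) ^ (i - 1).toNat)))).contains ((m : Int) + 1) = false := by
          rw [PySem.Dict.contains_eq_decide_mem_keys]
          simp only [decide_eq_false_iff_not, PySem.Dict.keys, List.map_map,
            List.mem_map, not_exists, Function.comp_def]
          intro x hx
          rw [PySem.List.mem_pyRange_one] at hx
          omega
        apply PySem.Dict.ext
        rw [PySem.Dict.items_insert_of_not_contains _ (2 ^ ((m : Int) - 1).toNat * 2) hfresh, hval]
        have h4 : ((m : Int) + 1 - 1).toNat = ((m : Int)).toNat := by omega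
        rw [h4]

-- ===== VERDICT (by name: the statement is the Claim_ definition above) =====
theorem get_wheat_map_spec : Claim_equal_get_wheat_map := by
  intro number _
  unfold Spec_get_wheat_map get_wheat_map get_wheat_map_alt
  by_cases hn : number ≤ 0
  · rw [PySem.List.pyRange_one_eq_nil (by omega)]
    simp [PySem.Dict.empty]
  · obtain ⟨n, rfl⟩ : ∃ n : Nat, number = (n : Int) :=
      ⟨number.toNat, (Int.toNat_of_nonneg (by omega)).symm⟩
    rw [get_wheat_map_loop n]

    refine List.map_congr_left (fun i _ => ?_)
    rw [Int.shiftLeft_eq, one_mul]
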